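-- pv_equiv track=rewrite | github.com/nirdizati-research/predict-python | src/encoding/declare/declaremining.py | filter_candidates_by_support
-- ===== SOURCE A (Python) =====
-- def filter_candidates_by_support(candidates, transformed_log, labels, support_true, support_false): #TODO JONAS, no idea what this does
--     filtered_candidates = []
--     for candidate in candidates:
--         count_false = 0
--         count_true = 0
--         for trace in transformed_log:
--             ev_ct = 0
--             for event in candidate:
--                 if event in [event for event in transformed_log[trace]]:
--                     ev_ct += 1
--                 else:
--                     break
--             if ev_ct == len(candidate):  # all candidate events in trace
--                 if labels[trace] == 'false':
--                     count_false += 1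
--                 else:
--                     count_true += 1
--
--             if count_false >= support_false or count_true >= support_true:
--                 filtered_candidates.append(candidate)
--                 break
--
--     return filtered_candidates
-- ===== SOURCE B (Python) =====
-- def filter_candidates_by_support(candidates, transformed_log, labels, support_true, support_false):
--     # Inverted index: event -> set of trace ids whose event list contains it.
--     index = {}
--     for tid, events in transformed_log.items():
--         for ev in events:
--             index.setdefault(ev, set()).add(tid)
--     all_ids = set(transformed_log)
--     result = []
--     for candidate in candidates:
--         matching = all_ids
--         for ev in candidate:
--             matching = matching & index.get(ev, set())
--         n_false = sum(1 for t in matching if labels[t] == 'false')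
--         n_true = len(matching) - n_false
--         if n_false >= support_false or n_true >= support_true:
--             result.append(candidate)
--     return result
-- ===== Notes on version B (the rewrite author's own statement) =====
-- stated objective: faster
-- what changed: B builds an inverted index (event -> set of trace ids) once, intersects the per-event trace sets per candidate and tests the totals, replacing A's per-candidate rescan of every trace (which re-materialises each trace's event list per candidate event) with index lookups and set intersection; Pre_ excludes assoc lists with duplicate trace ids (impossible for a Python dict) and inputs where a matching trace has no label, where A can raise KeyError or returns only thanks to its early break while B raises KeyError.
-- intended difference: On an empty transformed_log with a non-positive support threshold (and some candidate), A returns [] because its threshold check sits inside the trace loop and never runs, while B returns all candidates, which is intended since a threshold <= 0 is trivially met by zero matching traces. — e.g. on filter_candidates_by_support([["a"]], [], [], 0, 5): A returns [], B returns [["a"]]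
-- outside the precondition, e.g. on filter_candidates_by_support([['a']], {'t1': ['a'], 't2': ['a']}, {'t1': 'x'}, 1, 5): A returns [['a']], B raises KeyError
import Mathlib
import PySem

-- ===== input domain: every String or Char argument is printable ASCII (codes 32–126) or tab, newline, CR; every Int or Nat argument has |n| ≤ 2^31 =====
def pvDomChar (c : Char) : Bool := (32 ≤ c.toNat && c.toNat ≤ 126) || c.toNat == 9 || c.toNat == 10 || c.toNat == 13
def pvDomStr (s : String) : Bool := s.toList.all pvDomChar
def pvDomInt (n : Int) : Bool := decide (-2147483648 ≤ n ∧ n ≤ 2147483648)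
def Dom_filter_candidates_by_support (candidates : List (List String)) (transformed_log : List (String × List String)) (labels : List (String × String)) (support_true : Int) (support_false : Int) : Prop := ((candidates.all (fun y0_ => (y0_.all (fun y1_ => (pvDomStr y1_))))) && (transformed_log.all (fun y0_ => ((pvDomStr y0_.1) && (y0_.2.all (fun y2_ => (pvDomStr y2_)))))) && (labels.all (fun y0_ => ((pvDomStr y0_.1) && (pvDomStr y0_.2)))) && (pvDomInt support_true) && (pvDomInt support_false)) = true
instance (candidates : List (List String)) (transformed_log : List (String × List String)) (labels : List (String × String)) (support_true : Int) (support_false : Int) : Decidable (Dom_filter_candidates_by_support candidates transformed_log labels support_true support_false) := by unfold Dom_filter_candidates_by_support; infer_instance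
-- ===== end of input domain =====

-- B replaces A's per-candidate rescanning of every trace (with early break) by an inverted index
-- event → set of trace ids built once, intersected per candidate (objective: faster); on the
-- empty-log / non-positive-threshold corner B intentionally differs from A (see D_ below).


-- ===== PORT A =====
-- ev_ct loop: count candidate events (in order) until the first one missing from the trace's events
def aEvCount (events : List String) : List String → Int
  | [] => 0
  | e :: rest => if events.contains e then 1 + aEvCount events rest else 0

-- the 'for trace in transformed_log' loop with its two counters and the early break
def aTraceLoop (candidate : List String) (transformed_log : List (String × List String))
    (labels : List (String × String)) (support_true support_false : Int) :
    Int → Int → List (String × List String) → Bool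
  | _, _, [] => false
  | count_false, count_true, (tid, _) :: rest =>
    let events := (PySem.Dict.get? (PySem.Dict.mk transformed_log) tid).getD []
    let ev_ct := aEvCount events candidate
    let (count_false', count_true') :=
      if ev_ct = (candidate.length : Int) then
        if (PySem.Dict.get? (PySem.Dict.mk labels) tid).getD "" = "false" then
          (count_false + 1, count_true)
        else (count_false, count_true + 1)
      else (count_false, count_true)
    if support_false ≤ count_false' ∨ support_true ≤ count_true' then true
    else aTraceLoop candidate transformed_log labels support_true support_false count_false' count_true' rest

def filter_candidates_by_support (candidates : List (List String)) (transformed_log : List (String × List String)) (labels : List (String × String)) (support_true : Int) (support_false : Int) : List (List String) :=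
  candidates.foldl
    (fun filtered_candidates candidate =>
      if aTraceLoop candidate transformed_log labels support_true support_false 0 0 transformed_log then
        filtered_candidates ++ [candidate]
      else filtered_candidates)
    []

-- ===== PORT B =====
-- inverted index: event → set of trace ids whose event list contains it
def bIndex (transformed_log : List (String × List String)) : PySem.Dict String (PySem.Set String) :=
  transformed_log.foldl
    (fun index p =>
      p.2.foldl (fun index ev => index.modify ev PySem.Set.empty (fun s => PySem.Set.add s p.1)) index)
    PySem.Dict.empty

def filter_candidates_by_support_alt (candidates : List (List String)) (transformed_log : List (String × List String)) (labels : List (String × String)) (support_true : Int) (support_false : Int) : List (List String) :=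
  let index := bIndex transformed_log
  let all_ids : PySem.Set String := PySem.Set.ofList (transformed_log.map Prod.fst)
  candidates.foldl
    (fun result candidate =>
      let matching :=
        candidate.foldl
          (fun matching ev => PySem.Set.inter matching ((index.get? ev).getD PySem.Set.empty))
          all_ids
      let n_false : Int :=
        matching.countP (fun t => (PySem.Dict.get? (PySem.Dict.mk labels) t).getD "" = "false")
      let n_true : Int := PySem.Set.len matching - n_false
      if support_false ≤ n_false ∨ support_true ≤ n_true then
        result ++ [candidate]
      else result)
    []

-- ===== PRECONDITION & SPEC =====
-- Pre_ excludes (a) assoc lists with duplicate trace ids, which cannot arise from a Python dict (A's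
-- double counting there is an artefact of the assoc-list model), and (b) inputs where some trace whose
-- events contain all events of some candidate has no entry in labels: there A may raise KeyError or may
-- return only thanks to its early break, while B (which inspects every matching trace) raises KeyError.
def Pre_filter_candidates_by_support (candidates : List (List String)) (transformed_log : List (String × List String)) (labels : List (String × String)) (support_true : Int) (support_false : Int) : Prop :=
  (transformed_log.map Prod.fst).Nodup ∧
  ∀ p ∈ transformed_log, (∃ c ∈ candidates, ∀ e ∈ c, e ∈ p.2) →
    (PySem.Dict.get? (PySem.Dict.mk labels) p.1).isSome
instance (candidates : List (List String)) (transformed_log : List (String × List String)) (labels : List (String × String)) (support_true : Int) (support_false : Int) : Decidable (Pre_filter_candidates_by_support candidates transformed_log labels support_true support_false) := by unfold Pre_filter_candidates_by_support; infer_instance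

def pvWitness_filter_candidates_by_support : List (List String) × (List (String × List String)) × (List (String × String)) × Int × Int :=
  ([["a"], ["a", "b"], ["c"]],
   [("t1", ["a", "b"]), ("t2", ["a"])],
   [("t1", "false"), ("t2", "true")],
   1, 2)

-- On an empty transformed_log with a non-positive support threshold (and at least one candidate),
-- A returns [] because its threshold check sits inside the trace loop and never runs, while B
-- returns all candidates, which is intended since a threshold ≤ 0 is trivially met by zero matches.
def D_filter_candidates_by_support (candidates : List (List String)) (transformed_log : List (String × List String)) (labels : List (String × String)) (support_true : Int) (support_false : Int) : Prop :=
  transformed_log = [] ∧ candidates ≠ [] ∧ (support_false ≤ 0 ∨ support_true ≤ 0)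
instance (candidates : List (List String)) (transformed_log : List (String × List String)) (labels : List (String × String)) (support_true : Int) (support_false : Int) : Decidable (D_filter_candidates_by_support candidates transformed_log labels support_true support_false) := by unfold D_filter_candidates_by_support; infer_instance

def Spec_filter_candidates_by_support (candidates : List (List String)) (transformed_log : List (String × List String)) (labels : List (String × String)) (support_true : Int) (support_false : Int) (out : List (List String)) : Prop := ¬ D_filter_candidates_by_support candidates transformed_log labels support_true support_false → out = filter_candidates_by_support_alt candidates transformed_log labels support_true support_false
instance (candidates : List (List String)) (transformed_log : List (String × List String)) (labels : List (String × String)) (support_true : Int) (support_false : Int) (out : List (List String)) : Decidable (Spec_filter_candidates_by_support candidates transformed_log labels support_true support_false out) := by unfold Spec_filter_candidates_by_support; infer_instance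

def pvDiffWitness_filter_candidates_by_support : List (List String) × (List (String × List String)) × (List (String × String)) × Int × Int :=
  ([["a"]], [], [], 0, 5)

def pvDiffWitnessOut_filter_candidates_by_support : (List (List String)) × (List (List String)) :=
  ([], [["a"]])

-- ===== CLAIM (what is proved, stated in full; the proofs are below) =====
def Claim_unchanged_filter_candidates_by_support : Prop := ∀ (candidates : List (List String)) (transformed_log : List (String × List String)) (labels : List (String × String)) (support_true : Int) (support_false : Int), Dom_filter_candidates_by_support candidates transformed_log labels support_true support_false → Pre_filter_candidates_by_support candidates transformed_log labels support_true support_false → Spec_filter_candidates_by_support candidates transformed_log labels support_true support_false (filter_candidates_by_support candidates transformed_log labels support_true support_false)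
def Claim_changed_filter_candidates_by_support : Prop := Dom_filter_candidates_by_support (pvDiffWitness_filter_candidates_by_support.1) (pvDiffWitness_filter_candidates_by_support.2.1) (pvDiffWitness_filter_candidates_by_support.2.2.1) (pvDiffWitness_filter_candidates_by_support.2.2.2.1) (pvDiffWitness_filter_candidates_by_support.2.2.2.2) ∧ Pre_filter_candidates_by_support (pvDiffWitness_filter_candidates_by_support.1) (pvDiffWitness_filter_candidates_by_support.2.1) (pvDiffWitness_filter_candidates_by_support.2.2.1) (pvDiffWitness_filter_candidates_by_support.2.2.2.1) (pvDiffWitness_filter_candidates_by_support.2.2.2.2) ∧ D_filter_candidates_by_support (pvDiffWitness_filter_candidates_by_support.1) (pvDiffWitness_filter_candidates_by_support.2.1) (pvDiffWitness_filter_candidates_by_support.2.2.1) (pvDiffWitness_filter_candidates_by_support.2.2.2.1) (pvDiffWitness_filter_candidates_by_support.2.2.2.2) ∧ filter_candidates_by_support (pvDiffWitness_filter_candidates_by_support.1) (pvDiffWitness_filter_candidates_by_support.2.1) (pvDiffWitness_filter_candidates_by_support.2.2.1) (pvDiffWitness_filter_candidates_by_support.2.2.2.1) (pvDiffWitness_filter_candidates_by_support.2.2.2.2)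 = pvDiffWitnessOut_filter_candidates_by_support.1 ∧ filter_candidates_by_support_alt (pvDiffWitness_filter_candidates_by_support.1) (pvDiffWitness_filter_candidates_by_support.2.1) (pvDiffWitness_filter_candidates_by_support.2.2.1) (pvDiffWitness_filter_candidates_by_support.2.2.2.1) (pvDiffWitness_filter_candidates_by_support.2.2.2.2) = pvDiffWitnessOut_filter_candidates_by_support.2 ∧ pvDiffWitnessOut_filter_candidates_by_support.1 ≠ pvDiffWitnessOut_filter_candidates_by_support.2
def Claim_exact_filter_candidates_by_support : Prop := ∀ (candidates : List (List String)) (transformed_log : List (String × List String)) (labels : List (String × String)) (support_true : Int) (support_false : Int), Dom_filter_candidates_by_support candidates transformed_log labels support_true support_false → Pre_filter_candidates_by_support candidates transformed_log labels support_true support_false → D_filter_candidates_by_support candidates transformed_log labels support_true support_false → filter_candidates_by_support candidates transformed_log labels support_true support_false ≠ filter_candidates_by_support_alt candidates transformed_log labels support_true support_false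

-- ===== LEMMAS AND PROOFS =====
-- helper notions used only by the proofs
def pvLookup (log : List (String × List String)) (t : String) : List String :=
  (PySem.Dict.get? (PySem.Dict.mk log) t).getD []

def pvMatch (log : List (String × List String)) (c : List String) (t : String) : Bool :=
  c.all (fun e => (pvLookup log t).contains e)

def pvIsFalse (labels : List (String × String)) (t : String) : Bool :=
  decide ((PySem.Dict.get? (PySem.Dict.mk labels) t).getD "" = "false")

def pvCF (log : List (String × List String)) (labels : List (String × String)) (c : List String)
    (l : List (String × List String)) : Int :=
  (l.countP (fun p => pvMatch log c p.1 && pvIsFalse labels p.1) : Int)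

def pvCT (log : List (String × List String)) (labels : List (String × String)) (c : List String)
    (l : List (String × List String)) : Int :=
  (l.countP (fun p => pvMatch log c p.1 && !pvIsFalse labels p.1) : Int)

theorem aEvCount_eq_length_iff (events c : List String) :
    aEvCount events c = (c.length : Int) ↔ ∀ e ∈ c, events.contains e = true := by
  induction c with
  | nil => simp [aEvCount]
  | cons e rest ih =>
    by_cases h : events.contains e = true
    · simp only [aEvCount, h, if_true, List.length_cons, List.mem_cons]
      push_cast
      constructor
      · rintro hh x (rfl | hx)
        · exact h
        · exact (ih.mp (by omega)) x hx
      · intro hh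
        have := ih.mpr (fun x hx => hh x (Or.inr hx))
        omega
    · simp only [aEvCount, if_neg h, List.length_cons, List.mem_cons]
      constructor
      · intro hh; exfalso; omega
      · intro hh; exact absurd (hh e (Or.inl rfl)) h

theorem pvCF_nil (log : List (String × List String)) (labels : List (String × String)) (c : List String) :
    pvCF log labels c [] = 0 := rfl

theorem pvCT_nil (log : List (String × List String)) (labels : List (String × String)) (c : List String) :
    pvCT log labels c [] = 0 := rfl

theorem pvStep (P : Prop) [Decidable P] (sf st a b CF CT X Y : Int) (hCF : 0 ≤ CF) (hCT : 0 ≤ CT)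
    (hX : X = a + CF) (hY : Y = b + CT) (hP : ¬P → CF = 0 ∧ CT = 0) :
    (if sf ≤ a ∨ st ≤ b then true else decide (P ∧ (sf ≤ a + CF ∨ st ≤ b + CT))) =
    decide (sf ≤ X ∨ st ≤ Y) := by
  by_cases hstop : sf ≤ a ∨ st ≤ b
  · rw [if_pos hstop, eq_comm, decide_eq_true_eq]; omega
  · rw [if_neg hstop, decide_eq_decide]
    by_cases hp : P
    · simp only [hp, true_and]
      constructor <;> (intro h; omega)
    · obtain ⟨h1, h2⟩ := hP hp
      simp only [hp, false_and, false_iff]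
      omega

theorem aTraceLoop_eq (c : List String) (log : List (String × List String))
    (labels : List (String × String)) (st sf : Int) (l : List (String × List String)) (cf ct : Int) :
    aTraceLoop c log labels st sf cf ct l =
      decide (l ≠ [] ∧ (sf ≤ cf + pvCF log labels c l ∨ st ≤ ct + pvCT log labels c l)) := by
  induction l generalizing cf ct with
  | nil => simp [aTraceLoop, pvCF, pvCT]
  | cons p rest ih =>
    obtain ⟨tid, evs⟩ := p
    have hCFr : 0 ≤ pvCF log labels c rest := Int.natCast_nonneg _
    have hCTr : 0 ≤ pvCT log labels c rest := Int.natCast_nonneg _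
    have hcf : pvCF log labels c ((tid, evs) :: rest) =
        (if pvMatch log c tid && pvIsFalse labels tid then 1 else 0) + pvCF log labels c rest := by
      simp [pvCF, List.countP_cons]; split_ifs <;> omega
    have hct : pvCT log labels c ((tid, evs) :: rest) =
        (if pvMatch log c tid && !pvIsFalse labels tid then 1 else 0) + pvCT log labels c rest := by
      simp [pvCT, List.countP_cons]; split_ifs <;> omega
    have hm : (aEvCount ((PySem.Dict.get? (PySem.Dict.mk log) tid).getD []) c = (c.length : Int)) ↔
        pvMatch log c tid = true := by
      rw [aEvCount_eq_length_iff]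
      simp [pvMatch, pvLookup, List.all_eq_true]
    rw [aTraceLoop]
    by_cases hEv : aEvCount ((PySem.Dict.get? (PySem.Dict.mk log) tid).getD []) c = (c.length : Int)
    · have hmc : pvMatch log c tid = true := hm.mp hEv
      by_cases hf : (PySem.Dict.get? (PySem.Dict.mk labels) tid).getD "" = "false"
      · have hff : pvIsFalse labels tid = true := by simp [pvIsFalse, hf]
        rw [if_pos hEv, if_pos hf]
        simp only [ih, hcf, hct, hmc, hff, Bool.and_true, Bool.not_true, Bool.and_false, if_true,
          if_false, ne_eq, reduceCtorEq, not_false_eq_true, true_and]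
        exact pvStep (rest ≠ []) sf st (cf + 1) ct _ _ _ _ hCFr hCTr (by omega) (by omega)
          (fun h => by rw [not_not.mp h, pvCF_nil, pvCT_nil]; exact ⟨rfl, rfl⟩)
      · have hff : pvIsFalse labels tid = false := by simp [pvIsFalse, hf]
        rw [if_pos hEv, if_neg hf]
        simp only [ih, hcf, hct, hmc, hff, Bool.and_true, Bool.and_false, Bool.not_false, if_true,
          if_false, ne_eq, reduceCtorEq, not_false_eq_true, true_and]
        exact pvStep (rest ≠ []) sf st cf (ct + 1) _ _ _ _ hCFr hCTr (by omega) (by omega)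
          (fun h => by rw [not_not.mp h, pvCF_nil, pvCT_nil]; exact ⟨rfl, rfl⟩)
    · have hmc : pvMatch log c tid = false := by
        cases hq : pvMatch log c tid
        · rfl
        · exact absurd (hm.mpr hq) hEv
      rw [if_neg hEv]
      simp only [ih, hcf, hct, hmc, Bool.false_and, if_false, ne_eq, reduceCtorEq,
        not_false_eq_true, true_and]
      exact pvStep (rest ≠ []) sf st cf ct _ _ _ _ hCFr hCTr (by omega) (by omega)
        (fun h => by rw [not_not.mp h, pvCF_nil, pvCT_nil]; exact ⟨rfl, rfl⟩)

theorem bIndex_inner (tid : String) (evs : List String) (d : PySem.Dict String (PySem.Set String))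
    (t e : String) :
    t ∈ (evs.foldl (fun d ev => d.modify ev PySem.Set.empty (fun s => PySem.Set.add s tid)) d).getD e
          PySem.Set.empty ↔
      t ∈ d.getD e PySem.Set.empty ∨ (t = tid ∧ e ∈ evs) := by
  induction evs generalizing d with
  | nil => simp
  | cons ev rest ih =>
    rw [List.foldl_cons, ih, PySem.Dict.getD_modify]
    by_cases he : e = ev
    · rw [if_pos he]
      simp [PySem.Set.mem_add, he]
      tauto
    · rw [if_neg he]
      simp [he]

theorem bIndex_mem (log : List (String × List String)) (t e : String) :
    t ∈ (bIndex log).getD e PySem.Set.empty ↔ ∃ p ∈ log, p.1 = t ∧ e ∈ p.2 := by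
  have key : ∀ (l : List (String × List String)) (d : PySem.Dict String (PySem.Set String)),
      t ∈ (l.foldl (fun index p =>
            p.2.foldl (fun index ev => index.modify ev PySem.Set.empty
              (fun s => PySem.Set.add s p.1)) index) d).getD e PySem.Set.empty ↔
        t ∈ d.getD e PySem.Set.empty ∨ ∃ p ∈ l, p.1 = t ∧ e ∈ p.2 := by
    intro l
    induction l with
    | nil => simp
    | cons p rest ih =>
      intro d
      rw [List.foldl_cons, ih, bIndex_inner]
      simp only [List.mem_cons]
      constructor
      · rintro (⟨h | h⟩ | h)
        · exact Or.inl h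
        · exact Or.inr ⟨p, Or.inl rfl, h.1.symm, h.2⟩
        · obtain ⟨q, hq, hh⟩ := h
          exact Or.inr ⟨q, Or.inr hq, hh⟩
      · rintro (h | ⟨q, hq | hq, hh⟩)
        · exact Or.inl (Or.inl h)
        · subst hq; exact Or.inl (Or.inr ⟨hh.1.symm, hh.2⟩)
        · exact Or.inr ⟨q, hq, hh⟩
  rw [bIndex, key]
  simp [PySem.Set.empty]

theorem foldl_inter_mem (g : String → PySem.Set String) (c : List String) (m0 : PySem.Set String)
    (t : String) :
    t ∈ c.foldl (fun m ev => PySem.Set.inter m (g ev)) m0 ↔ t ∈ m0 ∧ ∀ e ∈ c, t ∈ g e := by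
  induction c generalizing m0 with
  | nil => simp
  | cons e rest ih =>
    rw [List.foldl_cons, ih, PySem.Set.mem_inter]
    simp only [List.mem_cons]
    constructor
    · rintro ⟨⟨h1, h2⟩, h3⟩
      exact ⟨h1, fun x hx => by rcases hx with rfl | hx; exact h2; exact h3 x hx⟩
    · rintro ⟨h1, h2⟩
      exact ⟨⟨h1, h2 e (Or.inl rfl)⟩, fun x hx => h2 x (Or.inr hx)⟩

theorem foldl_inter_nodup (g : String → PySem.Set String) (c : List String) (m0 : PySem.Set String)
    (h : m0.Nodup) : (c.foldl (fun m ev => PySem.Set.inter m (g ev)) m0).Nodup := by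
  induction c generalizing m0 with
  | nil => exact h
  | cons e rest ih => exact ih _ (PySem.Set.nodup_inter _ _ h)

theorem pvLookup_mem (log : List (String × List String)) (hnd : (log.map Prod.fst).Nodup)
    (t e : String) : e ∈ pvLookup log t ↔ ∃ p ∈ log, p.1 = t ∧ e ∈ p.2 := by
  have hkeys : (PySem.Dict.mk log).keys.Nodup := hnd
  constructor
  · intro he
    cases hq : PySem.Dict.get? (PySem.Dict.mk log) t with
    | none => rw [pvLookup, hq] at he; simp at he
    | some evs =>
      have hmem : (t, evs) ∈ log := (PySem.Dict.get?_eq_some_iff_mem_items _ _ _ hkeys).mp hq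
      exact ⟨(t, evs), hmem, rfl, by rw [pvLookup, hq] at he; exact he⟩
  · rintro ⟨⟨t', evs⟩, hp, rfl, he⟩
    have hq : PySem.Dict.get? (PySem.Dict.mk log) t' = some evs :=
      (PySem.Dict.get?_eq_some_iff_mem_items _ _ _ hkeys).mpr hp
    rw [pvLookup, hq]
    exact he

theorem matching_perm (log : List (String × List String)) (c : List String)
    (hnd : (log.map Prod.fst).Nodup) :
    (c.foldl (fun m ev => PySem.Set.inter m ((PySem.Dict.get? (bIndex log) ev).getD PySem.Set.empty))
        (PySem.Set.ofList (log.map Prod.fst))).Perm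
      ((log.map Prod.fst).filter (fun t => pvMatch log c t)) := by
  rw [List.perm_ext_iff_of_nodup
    (foldl_inter_nodup _ _ _ (PySem.Set.nodup_ofList _)) (hnd.filter _)]
  intro t
  rw [foldl_inter_mem, List.mem_filter, PySem.Set.mem_ofList]
  constructor
  · rintro ⟨h1, h2⟩
    refine ⟨h1, ?_⟩
    simp only [pvMatch, List.all_eq_true]
    intro e he
    have := h2 e he
    rw [← PySem.Dict.getD_eq_get?_getD, bIndex_mem, ← pvLookup_mem log hnd] at this
    simpa using this
  · rintro ⟨h1, h2⟩
    refine ⟨h1, fun e he => ?_⟩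
    rw [← PySem.Dict.getD_eq_get?_getD, bIndex_mem, ← pvLookup_mem log hnd]
    simp only [pvMatch, List.all_eq_true] at h2
    simpa using h2 e he

theorem countP_add_not (p : String → Bool) (l : List String) :
    l.countP p + l.countP (fun a => !p a) = l.length := by
  induction l with
  | nil => rfl
  | cons a l ih => cases h : p a <;> simp [h] <;> omega

theorem nfalse_eq (log : List (String × List String)) (labels : List (String × String))
    (c : List String) (hnd : (log.map Prod.fst).Nodup) :
    (((c.foldl (fun m ev => PySem.Set.inter m
          ((PySem.Dict.get? (bIndex log) ev).getD PySem.Set.empty))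
        (PySem.Set.ofList (log.map Prod.fst))).countP (fun t => pvIsFalse labels t) : Nat) : Int) =
      pvCF log labels c log := by
  rw [(matching_perm log c hnd).countP_eq, List.countP_filter, List.countP_map, pvCF]
  congr 1
  apply List.countP_congr
  intro p _
  simp [Bool.and_comm]

theorem ntrue_eq (log : List (String × List String)) (labels : List (String × String))
    (c : List String) (hnd : (log.map Prod.fst).Nodup) :
    PySem.Set.len (c.foldl (fun m ev => PySem.Set.inter m
          ((PySem.Dict.get? (bIndex log) ev).getD PySem.Set.empty))
        (PySem.Set.ofList (log.map Prod.fst))) -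
      (((c.foldl (fun m ev => PySem.Set.inter m
          ((PySem.Dict.get? (bIndex log) ev).getD PySem.Set.empty))
        (PySem.Set.ofList (log.map Prod.fst))).countP (fun t => pvIsFalse labels t) : Nat) : Int) =
      pvCT log labels c log := by
  set M := c.foldl (fun m ev => PySem.Set.inter m
      ((PySem.Dict.get? (bIndex log) ev).getD PySem.Set.empty))
    (PySem.Set.ofList (log.map Prod.fst)) with hM
  have hlen : M.countP (fun t => pvIsFalse labels t) +
      M.countP (fun t => !pvIsFalse labels t) = M.length := countP_add_not _ _
  have hnot : ((M.countP (fun t => !pvIsFalse labels t) : Nat) : Int) = pvCT log labels c log := by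
    rw [hM, (matching_perm log c hnd).countP_eq, List.countP_filter, List.countP_map, pvCT]
    congr 1
    apply List.countP_congr
    intro p _
    simp [Bool.and_comm]
  have hlenM : PySem.Set.len M = (M.length : Int) := rfl
  omega

theorem foldl_filter_congr {α : Type} (l : List α) (P Q : α → Prop) [DecidablePred P]
    [DecidablePred Q] (h : ∀ x ∈ l, P x ↔ Q x) (acc : List α) :
    l.foldl (fun acc x => if P x then acc ++ [x] else acc) acc =
    l.foldl (fun acc x => if Q x then acc ++ [x] else acc) acc := by
  induction l generalizing acc with
  | nil => rfl
  | cons x rest ih =>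
    rw [List.foldl_cons, List.foldl_cons]
    by_cases hx : P x
    · rw [if_pos hx, if_pos ((h x (List.mem_cons_self)).mp hx)]
      exact ih (fun y hy => h y (List.mem_cons_of_mem _ hy)) _
    · rw [if_neg hx, if_neg (fun hq => hx ((h x (List.mem_cons_self)).mpr hq))]
      exact ih (fun y hy => h y (List.mem_cons_of_mem _ hy)) _

theorem foldl_filter_all {α : Type} (l : List α) (P : α → Prop) [DecidablePred P]
    (h : ∀ x ∈ l, P x) (acc : List α) :
    l.foldl (fun acc x => if P x then acc ++ [x] else acc) acc = acc ++ l := by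
  induction l generalizing acc with
  | nil => simp
  | cons x rest ih =>
    rw [List.foldl_cons, if_pos (h x List.mem_cons_self),
      ih (fun y hy => h y (List.mem_cons_of_mem _ hy))]
    simp

theorem foldl_filter_none {α : Type} (l : List α) (P : α → Prop) [DecidablePred P]
    (h : ∀ x ∈ l, ¬ P x) (acc : List α) :
    l.foldl (fun acc x => if P x then acc ++ [x] else acc) acc = acc := by
  induction l generalizing acc with
  | nil => rfl
  | cons x rest ih =>
    rw [List.foldl_cons, if_neg (h x List.mem_cons_self)]
    exact ih (fun y hy => h y (List.mem_cons_of_mem _ hy)) _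

theorem matching_empty_log (c : List String) :
    c.foldl (fun m ev => PySem.Set.inter m
        ((PySem.Dict.get? (bIndex ([] : List (String × List String))) ev).getD PySem.Set.empty))
      (PySem.Set.ofList (([] : List (String × List String)).map Prod.fst)) = [] := by
  apply List.eq_nil_iff_forall_not_mem.mpr
  intro t ht
  have := (foldl_inter_mem _ c _ t).mp ht
  simpa [PySem.Set.mem_ofList] using this.1

theorem A_empty_log (candidates : List (List String)) (labels : List (String × String))
    (st sf : Int) :
    filter_candidates_by_support candidates [] labels st sf = [] := by
  unfold filter_candidates_by_support
  induction candidates with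
  | nil => rfl
  | cons c rest ih => rw [List.foldl_cons, aTraceLoop]; exact ih

theorem pvWitness_ok :
    Dom_filter_candidates_by_support (pvWitness_filter_candidates_by_support.1) (pvWitness_filter_candidates_by_support.2.1) (pvWitness_filter_candidates_by_support.2.2.1) (pvWitness_filter_candidates_by_support.2.2.2.1) (pvWitness_filter_candidates_by_support.2.2.2.2) ∧
    Pre_filter_candidates_by_support (pvWitness_filter_candidates_by_support.1) (pvWitness_filter_candidates_by_support.2.1) (pvWitness_filter_candidates_by_support.2.2.1) (pvWitness_filter_candidates_by_support.2.2.2.1) (pvWitness_filter_candidates_by_support.2.2.2.2) := by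
  constructor <;> decide

-- ===== VERDICT (by name: the statements are the Claim_ definitions above) =====
theorem filter_candidates_by_support_spec : Claim_unchanged_filter_candidates_by_support := by
  unfold Claim_unchanged_filter_candidates_by_support
  intro candidates log labels st sf _dom hpre
  obtain ⟨hnd, -⟩ := hpre
  unfold Spec_filter_candidates_by_support
  intro hnD
  rcases List.eq_nil_or_concat' log with rfl | hlogne
  · -- empty log: ¬D_ forces candidates = [] or both thresholds positive
    rw [A_empty_log]
    unfold filter_candidates_by_support_alt
    simp only []
    rcases Classical.em (candidates = []) with rfl | hc
    · rfl
    · have hpos : 0 < sf ∧ 0 < st := by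
        unfold D_filter_candidates_by_support at hnD
        constructor <;> by_contra h <;> exact hnD ⟨rfl, hc, by omega⟩
      rw [eq_comm]
      apply foldl_filter_none
      intro c _
      rw [matching_empty_log c]
      have hl : PySem.Set.len ([] : List String) = 0 := rfl
      simp only [List.countP_nil, hl]
      push_cast
      omega
  · -- nonempty log: both conditions coincide for every candidate
    have hlog : log ≠ [] := by rcases hlogne with ⟨l, a, rfl⟩; simp
    unfold filter_candidates_by_support filter_candidates_by_support_alt
    simp only []
    apply foldl_filter_congr
    intro c _
    rw [aTraceLoop_eq, decide_eq_true_eq, zero_add, zero_add]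
    rw [show (fun t => decide ((PySem.Dict.get? (PySem.Dict.mk labels) t).getD "" = "false")) =
        (fun t => pvIsFalse labels t) from rfl]
    rw [ntrue_eq log labels c hnd, nfalse_eq log labels c hnd]
    simp [hlog]

theorem filter_candidates_by_support_changed : Claim_changed_filter_candidates_by_support := by
  unfold Claim_changed_filter_candidates_by_support
  decide

theorem filter_candidates_by_support_tight : Claim_exact_filter_candidates_by_support := by
  unfold Claim_exact_filter_candidates_by_support
  intro candidates log labels st sf _dom _pre hD
  obtain ⟨rfl, hc, hle⟩ := hD
  rw [A_empty_log]
  unfold filter_candidates_by_support_alt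
  simp only []
  rw [foldl_filter_all]
  · exact fun h => hc h.symm
  · intro c _
    rw [matching_empty_log c]
    have hl : PySem.Set.len ([] : List String) = 0 := rfl
    simp only [List.countP_nil, hl]
    push_cast
    omega
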